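-- pv_equiv track=rewrite | github.com/HelyaHsiung/Contour_Track | Contour_Track/Algorithm.py | RemoveRepeatedLine
-- ===== SOURCE A (Python) =====
-- def RemoveRepeatedLine(line_list):
--     '''
--     去除边表中的重复边，连根拔除,元素数量小于3的表直接返回不处理
--     :param line_list: 边表
--     :return : 没有重复边的边表
--     '''
--     if len(line_list) > 2:
--         i = 0
--         while (i < len(line_list) - 1):
--             line_1 = line_list[i]
--             for j in range(i + 1, len(line_list), 1):
--                 line_2 = line_list[j]
--                 if line_1 == line_2:
--                     line_list.pop(i)
--                     line_list.pop(j - 1)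
--                     i -= 1
--                     break
--                 else:
--                     pass
--             i += 1
--     else:
--         pass
--
--     return line_list
-- ===== SOURCE B (Python) =====
-- def RemoveRepeatedLine(line_list):
--     '''
--     Remove every paired duplicate edge in one pass using parity toggling;
--     lists with fewer than 3 elements are returned untouched (same guard as A).
--     Mutates line_list in place and returns it.
--     '''
--     if len(line_list) > 2:
--         result = []
--         for line in line_list:
--             if line in result:
--                 result.remove(line)
--             else:
--                 result.append(line)
--         line_list[:] = result
--     return line_list
-- ===== Notes on version B (the rewrite author's own statement) =====
-- stated objective: simpler
-- what changed: A's quadratic in-place while/for loop with pop(i)/pop(j-1) index juggling is replaced by a single pass that toggles each edge in a fresh result list (append if absent, remove the earlier copy if present) and writes it back in place; the len<=2 guard is kept.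
import Mathlib
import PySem

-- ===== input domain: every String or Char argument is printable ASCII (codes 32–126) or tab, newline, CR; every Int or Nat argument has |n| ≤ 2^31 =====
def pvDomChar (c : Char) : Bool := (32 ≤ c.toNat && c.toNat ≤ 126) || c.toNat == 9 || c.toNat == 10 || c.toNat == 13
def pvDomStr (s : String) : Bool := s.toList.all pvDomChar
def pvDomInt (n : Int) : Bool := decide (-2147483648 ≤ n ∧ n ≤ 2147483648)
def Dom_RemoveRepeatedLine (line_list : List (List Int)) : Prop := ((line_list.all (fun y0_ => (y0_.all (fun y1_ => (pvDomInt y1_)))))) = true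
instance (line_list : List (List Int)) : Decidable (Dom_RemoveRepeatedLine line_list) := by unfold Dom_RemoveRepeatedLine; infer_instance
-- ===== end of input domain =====

-- B replaces A's quadratic index-juggling pair removal by a single parity-toggling pass
-- (objective: simpler). Both A and B mutate the argument list in place in Python
-- (A via pop, B via `line_list[:] = result`); the equivalence proved here is about the return value.

-- ===== PORT A =====
-- inner 'for j in range(i + 1, len(line_list), 1)' loop: returns the first j ≥ start
-- with line_list[j] == line_1 (the j at which Python breaks), none if the loop finishes
def pvInnerFind (line1 : List Int) (l : List (List Int)) (j : Nat) : Option Nat :=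
  if h : j < l.length then
    if l[j] = line1 then some j else pvInnerFind line1 l (j + 1)
  else none
termination_by l.length - j

-- the 'while (i < len(line_list) - 1)' loop; on a match Python does
-- pop(i); pop(j-1); i -= 1; break; i += 1 — the i -= 1 and i += 1 cancel,
-- so the recursive call keeps the same i
def pvOuterLoop (l : List (List Int)) (i : Nat) : List (List Int) :=
  if h : i < l.length - 1 then
    let line1 := l[i]'(by omega)
    match pvInnerFind line1 l (i + 1) with
    | some j => pvOuterLoop ((l.eraseIdx i).eraseIdx (j - 1)) i
    | none => pvOuterLoop l (i + 1)
  else l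
termination_by 2 * l.length - i
decreasing_by
  · have h1 : ((l.eraseIdx i).eraseIdx (j - 1)).length ≤ (l.eraseIdx i).length :=
      List.length_eraseIdx_le _ _
    have h2 : (l.eraseIdx i).length = l.length - 1 := by
      rw [List.length_eraseIdx_of_lt (by omega)]
    omega
  · omega

def RemoveRepeatedLine (line_list : List (List Int)) : List (List Int) :=
  if 2 < line_list.length then pvOuterLoop line_list 0 else line_list

-- ===== PORT B =====
-- one toggle step: 'if line in result: result.remove(line) else: result.append(line)'
def pvToggle (acc : List (List Int)) (line : List Int) : List (List Int) :=
  if line ∈ acc then acc.erase line else acc ++ [line]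

def RemoveRepeatedLine_alt (line_list : List (List Int)) : List (List Int) :=
  if 2 < line_list.length then line_list.foldl pvToggle [] else line_list

-- ===== PRECONDITION & SPEC =====
def Spec_RemoveRepeatedLine (line_list : List (List Int)) (out : List (List Int)) : Prop := out = RemoveRepeatedLine_alt line_list
instance (line_list : List (List Int)) (out : List (List Int)) : Decidable (Spec_RemoveRepeatedLine line_list out) := by unfold Spec_RemoveRepeatedLine; infer_instance

-- ===== CLAIM (what is proved, stated in full; the proofs are below) =====
def Claim_equal_RemoveRepeatedLine : Prop := ∀ (line_list : List (List Int)), Dom_RemoveRepeatedLine line_list → Spec_RemoveRepeatedLine line_list (RemoveRepeatedLine line_list)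

-- ===== LEMMAS AND PROOFS =====

-- first index of x in a list (proof-side characterisation of the inner for loop)
def pvFirstIdx (x : List Int) : List (List Int) → Option Nat
  | [] => none
  | y :: t => if y = x then some 0 else (pvFirstIdx x t).map (· + 1)

theorem pvInnerFind_eq (x : List Int) (l : List (List Int)) (j : Nat) :
    pvInnerFind x l j = (pvFirstIdx x (l.drop j)).map (· + j) := by
  fun_induction pvInnerFind x l j with
  | case1 j h heq =>
      rw [List.drop_eq_getElem_cons h]
      simp [pvFirstIdx, heq]
  | case2 j h heq ih =>
      rw [List.drop_eq_getElem_cons h]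
      simp only [pvFirstIdx, if_neg heq, ih, Option.map_map]
      cases pvFirstIdx x (l.drop (j + 1)) with
      | none => simp
      | some k =>
          simp
          omega
  | case3 j h =>
      rw [List.drop_eq_nil_of_le (by omega)]
      simp [pvFirstIdx]

theorem pvFirstIdx_none (x : List Int) (t : List (List Int)) :
    pvFirstIdx x t = none ↔ x ∉ t := by
  induction t with
  | nil => simp [pvFirstIdx]
  | cons y t ih =>
      by_cases hy : y = x
      · subst hy
        simp [pvFirstIdx]
      · simp only [pvFirstIdx, if_neg hy, Option.map_eq_none_iff, ih, List.mem_cons]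
        constructor
        · intro h hc
          rcases hc with rfl | hc
          · exact hy rfl
          · exact h hc
        · intro h hc
          exact h (Or.inr hc)

theorem pvFirstIdx_some (x : List Int) (t : List (List Int)) (k : Nat)
    (h : pvFirstIdx x t = some k) :
    t.eraseIdx k = t.erase x ∧ x ∈ t := by
  induction t generalizing k with
  | nil => simp [pvFirstIdx] at h
  | cons y t ih =>
      by_cases hy : y = x
      · subst hy
        simp [pvFirstIdx] at h
        subst h
        simp
      · simp only [pvFirstIdx, if_neg hy, Option.map_eq_some_iff] at h
        obtain ⟨k', hk', rfl⟩ := h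
        obtain ⟨h1, h2⟩ := ih k' hk'
        refine ⟨?_, List.mem_cons_of_mem _ h2⟩
        rw [List.eraseIdx_cons_succ, h1,
          List.erase_cons_tail (by simp [hy])]

theorem foldl_toggle_disjoint (s : List (List Int)) (p q : List (List Int))
    (h : ∀ y ∈ s, y ∉ p) :
    s.foldl pvToggle (p ++ q) = p ++ s.foldl pvToggle q := by
  induction s generalizing q with
  | nil => simp
  | cons y s ih =>
      have hyp : y ∉ p := h y (List.mem_cons_self ..)
      simp only [List.foldl_cons]
      by_cases hq : y ∈ q
      · rw [show pvToggle (p ++ q) y = p ++ q.erase y by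
          simp [pvToggle, hq, List.erase_append_right q hyp],
          show pvToggle q y = q.erase y by simp [pvToggle, hq]]
        exact ih _ (fun z hz => h z (List.mem_cons_of_mem _ hz))
      · rw [show pvToggle (p ++ q) y = p ++ (q ++ [y]) by
          simp [pvToggle, hq, hyp],
          show pvToggle q y = q ++ [y] by simp [pvToggle, hq]]
        exact ih _ (fun z hz => h z (List.mem_cons_of_mem _ hz))

theorem foldl_toggle_erase (t : List (List Int)) (p q : List (List Int)) (x : List Int)
    (hx : x ∈ t) (hp : x ∉ p) (hq : x ∉ q) :
    t.foldl pvToggle (p ++ x :: q) = (t.erase x).foldl pvToggle (p ++ q) := by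
  induction t generalizing p q with
  | nil => simp at hx
  | cons y t ih =>
      by_cases hyx : y = x
      · subst hyx
        simp only [List.foldl_cons, List.erase_cons_head]
        rw [show pvToggle (p ++ y :: q) y = p ++ q by
          simp [pvToggle, List.erase_append_right _ hp]]
      · have hxt : x ∈ t := by
          rcases List.mem_cons.mp hx with h | h
          · exact absurd h.symm hyx
          · exact h
        rw [List.erase_cons_tail (by simp [hyx])]
        simp only [List.foldl_cons]
        by_cases hyp : y ∈ p
        · rw [show pvToggle (p ++ x :: q) y = p.erase y ++ x :: q by
            simp [pvToggle, List.mem_append, hyp, List.erase_append_left _ hyp],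
            show pvToggle (p ++ q) y = p.erase y ++ q by
              simp [pvToggle, List.mem_append, hyp, List.erase_append_left _ hyp]]
          exact ih (p.erase y) q hxt (fun hc => hp (List.mem_of_mem_erase hc)) hq
        · by_cases hyq : y ∈ q
          · rw [show pvToggle (p ++ x :: q) y = p ++ x :: q.erase y by
              simp [pvToggle, List.mem_append, hyp, hyq,
                List.erase_append_right _ hyp,
                List.erase_cons_tail (by simp [Ne.symm hyx] : ¬(x == y))],
              show pvToggle (p ++ q) y = p ++ q.erase y by
                simp [pvToggle, List.mem_append, hyq,
                  List.erase_append_right _ hyp]]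
            exact ih p (q.erase y) hxt hp (fun hc => hq (List.mem_of_mem_erase hc))
          · rw [show pvToggle (p ++ x :: q) y = p ++ x :: (q ++ [y]) by
              simp [pvToggle, List.mem_append, hyp, hyq, hyx],
              show pvToggle (p ++ q) y = p ++ (q ++ [y]) by
                simp [pvToggle, List.mem_append, hyp, hyq]]
            refine ih p (q ++ [y]) hxt hp ?_
            intro hc
            rcases List.mem_append.mp hc with hc | hc
            · exact hq hc
            · exact hyx (List.mem_singleton.mp hc).symm

theorem pvNodupSnoc (p : List (List Int)) (x : List Int) (h : p.Nodup) (hx : x ∉ p) :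
    (p ++ [x]).Nodup := by
  rw [List.nodup_append]
  refine ⟨h, List.nodup_singleton _, ?_⟩
  intro a ha b hb hab
  exact hx ((List.mem_singleton.mp hb) ▸ hab ▸ ha)

-- main invariant: processed prefix p is duplicate-free and disjoint from the rest r
theorem pvOuterLoop_eq (n : Nat) : ∀ (p r : List (List Int)), r.length ≤ n →
    p.Nodup → (∀ y ∈ r, y ∉ p) →
    pvOuterLoop (p ++ r) p.length = p ++ r.foldl pvToggle [] := by
  induction n with
  | zero =>
      intro p r hlen _ _
      have : r = [] := List.length_eq_zero_iff.mp (Nat.le_zero.mp hlen)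
      subst this
      rw [pvOuterLoop]
      simp
  | succ n ih =>
      intro p r hlen hnodup hdisj
      rw [pvOuterLoop]
      by_cases hg : p.length < (p ++ r).length - 1
      · -- r has at least 2 elements
        have hr2 : 2 ≤ r.length := by simp [List.length_append] at hg; omega
        obtain ⟨x, t, rfl⟩ : ∃ x t, r = x :: t := by
          cases r with
          | nil => simp at hr2
          | cons x t => exact ⟨x, t, rfl⟩
        have hget : (p ++ x :: t)[p.length]'(by omega) = x := by
          rw [List.getElem_append_right (Nat.le_refl _)]
          simp
        have hdrop : (p ++ x :: t).drop (p.length + 1) = t := by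
          rw [show p ++ x :: t = (p ++ [x]) ++ t by simp,
            show p.length + 1 = (p ++ [x]).length by simp]
          exact List.drop_left
        rw [dif_pos hg]
        simp only [hget, pvInnerFind_eq, hdrop]
        cases hfi : pvFirstIdx x t with
        | none =>
            -- x has no later duplicate: advance i
            have hxt : x ∉ t := (pvFirstIdx_none x t).mp hfi
            have hxp : x ∉ p := hdisj x (List.mem_cons_self ..)
            simp only [Option.map_none]
            have hrw : p ++ x :: t = (p ++ [x]) ++ t := by simp
            have := ih (p ++ [x]) t (by simp at hlen ⊢; omega)
              (pvNodupSnoc p x hnodup hxp)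
              (by
                intro y hy hmem
                rcases List.mem_append.mp hmem with hc | hc
                · exact hdisj y (List.mem_cons_of_mem _ hy) hc
                · exact hxt (List.mem_singleton.mp hc ▸ hy))
            rw [show p.length + 1 = (p ++ [x]).length by simp, hrw, this]
            have : t.foldl pvToggle [x] = [x] ++ t.foldl pvToggle [] := by
              have := foldl_toggle_disjoint t [x] []
                (fun y hy => by simp; exact fun hyx => hxt (hyx ▸ hy))
              simpa using this
            simp [List.foldl_cons, pvToggle, this]
        | some k =>
            -- first duplicate of x is at t[k]: drop both copies, keep i
            obtain ⟨herase, hxt⟩ := pvFirstIdx_some x t k hfi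
            have hxp : x ∉ p := hdisj x (List.mem_cons_self ..)
            simp only [Option.map_some]
            have e1 : (p ++ x :: t).eraseIdx p.length = p ++ t := by
              rw [List.eraseIdx_append_of_length_le (Nat.le_refl _)]
              simp
            have e2 : (p ++ t).eraseIdx (k + (p.length + 1) - 1) = p ++ t.eraseIdx k := by
              rw [show k + (p.length + 1) - 1 = p.length + k by omega,
                List.eraseIdx_append_of_length_le (by omega)]
              congr 2
              omega
            rw [e1, e2, herase]
            have := ih p (t.erase x)
              (by
                have := t.length_erase_of_mem hxt
                simp at hlen; omega)
              hnodup
              (fun y hy => hdisj y (List.mem_cons_of_mem _ (List.mem_of_mem_erase hy)))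
            rw [this]
            have : t.foldl pvToggle [x] = (t.erase x).foldl pvToggle [] := by
              have := foldl_toggle_erase t [] [] x hxt (by simp) (by simp)
              simpa using this
            simp [List.foldl_cons, pvToggle, this]
      · rw [dif_neg hg]
        have hle : r.length ≤ 1 := by simp [List.length_append] at hg ⊢; omega
        cases r with
        | nil => simp
        | cons x r' =>
            cases r' with
            | nil => simp [pvToggle]
            | cons z r'' => simp at hle

-- ===== VERDICT (by name: the statement is the Claim_ definition above) =====
theorem RemoveRepeatedLine_spec : Claim_equal_RemoveRepeatedLine := by
  intro l _
  unfold Spec_RemoveRepeatedLine RemoveRepeatedLine RemoveRepeatedLine_alt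
  split
  · have := pvOuterLoop_eq l.length [] l (Nat.le_refl _) (by simp) (by simp)
    simpa using this
  · rfl
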